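-- pv_equiv track=rewrite | github.com/Kusla75/dist-graph | scripts/partition.py | clone_nodes
-- ===== SOURCE A (Python) =====
-- def clone_nodes(nodes_list, n_partitions, k):
--     '''Clones nodes to each partition. Each node is cloned k times
--     and there isn't any partition with duplicates'''
--
--     ls = []
--     for i in range(n_partitions):
--         ls.append([])
--
--     for node in nodes_list:
--         it = k
--         while it > 0:
--             id_min = find_min_num_partiton(ls)
--             if node not in ls[id_min]:
--                 ls[id_min].append(node)
--             it -= 1
--
--     return ls
--
-- def find_min_num_partiton(partitions):
--     '''Finds partition with minimun number of nodes'''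
--
--     minimum = len(partitions[0])
--     id_min = 0
--
--     for id in range(len(partitions)):
--         if minimum >= len(partitions[id]):
--             minimum = len(partitions[id])
--             id_min = id
--
--     return id_min
-- ===== SOURCE B (Python) =====
-- def clone_nodes(nodes_list, n_partitions, k):
--     '''Round-robin closed form: the t-th successful placement always lands in
--     partition n_partitions-1-(t % n_partitions), so no minimum scan is needed;
--     a blocked placement ends the node's cloning (the state can no longer change).'''
--     parts = [[] for _ in range(n_partitions)]
--     seen = [set() for _ in range(n_partitions)]
--     t = 0
--     for node in nodes_list:
--         for _ in range(k):
--             j = n_partitions - 1 - (t % n_partitions)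
--             if node in seen[j]:
--                 break
--             parts[j].append(node)
--             seen[j].add(node)
--             t += 1
--     return parts
-- ===== Notes on version B (the rewrite author's own statement) =====
-- stated objective: faster
-- what changed: B eliminates A's per-iteration minimum scan entirely: A's length state is always a staircase, so the t-th successful placement provably lands in partition n_partitions-1-(t % n_partitions); B just keeps a placement counter plus per-partition membership sets and breaks at the first blocked placement.
import Mathlib
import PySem

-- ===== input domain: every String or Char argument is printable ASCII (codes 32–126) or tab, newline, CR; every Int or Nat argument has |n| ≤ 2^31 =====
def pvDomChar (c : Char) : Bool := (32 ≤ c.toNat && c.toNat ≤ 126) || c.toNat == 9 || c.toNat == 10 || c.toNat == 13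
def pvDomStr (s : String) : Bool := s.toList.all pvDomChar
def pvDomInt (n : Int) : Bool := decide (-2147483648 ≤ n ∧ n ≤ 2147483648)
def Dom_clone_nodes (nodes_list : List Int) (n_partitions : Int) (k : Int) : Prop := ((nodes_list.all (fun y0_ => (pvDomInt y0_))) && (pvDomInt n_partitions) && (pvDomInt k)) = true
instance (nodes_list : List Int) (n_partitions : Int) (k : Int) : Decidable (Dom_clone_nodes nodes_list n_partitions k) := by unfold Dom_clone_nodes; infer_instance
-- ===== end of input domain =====

-- B replaces A's repeated minimum scan by the round-robin closed form: the t-th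
-- successful placement always lands in partition P-1-(t mod P).

-- ===== PORT A =====
-- Python's find_min_num_partiton; 'partitions[0]' raises IndexError on an empty list
-- (inputs outside Pre_), the port reads headD [] there.
def find_min_num_partiton (partitions : List (List Int)) : Nat :=
  let init : Int × Nat := (((partitions.headD []).length : Int), 0)
  let r := (List.range partitions.length).foldl
    (fun (st : Int × Nat) id =>
      let l : Int := (((partitions[id]?).getD []).length : Int)
      if l ≤ st.1 then (l, id) else st)      -- 'minimum >= len(partitions[id])'
    init
  r.2

-- one iteration of A's inner 'while' body
def cloneStep (ls : List (List Int)) (node : Int) : List (List Int) :=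
  let id_min := find_min_num_partiton ls
  let part := (ls[id_min]?).getD []
  if node ∈ part then ls else ls.set id_min (part ++ [node])

def clone_nodes (nodes_list : List Int) (n_partitions : Int) (k : Int) : List (List Int) :=
  let ls := List.replicate n_partitions.toNat ([] : List Int)
  nodes_list.foldl
    (fun ls node =>
      -- 'it = k; while it > 0: … it -= 1'  runs k.toNat times
      (List.range k.toNat).foldl (fun ls _ => cloneStep ls node) ls)
    ls

-- ===== PORT B =====
-- Source B's inner 'for _ in range(k)' with break, over the state (parts, seen, t);
-- the index j = P-1-(t % P) is nonnegative whenever the body runs inside Pre_,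
-- so '.toNat' is exact there.
def bLoop (P : Int) (node : Int) (fuel : Nat)
    (parts : List (List Int)) (seen : List (PySem.Set Int)) (t : Int) :
    List (List Int) × List (PySem.Set Int) × Int :=
  match fuel with
  | 0 => (parts, seen, t)
  | fuel + 1 =>
    let j := (P - 1 - PySem.Int.mod t P).toNat
    let sj := (seen[j]?).getD []
    if node ∈ sj then (parts, seen, t)       -- break
    else
      bLoop P node fuel
        (parts.set j (((parts[j]?).getD []) ++ [node]))
        (seen.set j (PySem.Set.add sj node))
        (t + 1)

def clone_nodes_alt (nodes_list : List Int) (n_partitions : Int) (k : Int) : List (List Int) :=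
  let n := n_partitions.toNat
  let st := nodes_list.foldl
    (fun (st : List (List Int) × List (PySem.Set Int) × Int) node =>
      bLoop n_partitions node k.toNat st.1 st.2.1 st.2.2)
    (List.replicate n ([] : List Int), List.replicate n ([] : PySem.Set Int), (0 : Int))
  st.1

-- ===== PRECONDITION & SPEC =====
-- Pre_ excludes exactly the inputs where Python A raises IndexError: n_partitions ≤ 0
-- with a nonempty nodes_list and k ≥ 1 (find_min_num_partiton indexes into an empty list).
def Pre_clone_nodes (nodes_list : List Int) (n_partitions : Int) (k : Int) : Prop :=
  0 < n_partitions ∨ nodes_list = [] ∨ k ≤ 0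
instance (nodes_list : List Int) (n_partitions : Int) (k : Int) : Decidable (Pre_clone_nodes nodes_list n_partitions k) := by unfold Pre_clone_nodes; infer_instance
def pvWitness_clone_nodes : List Int × Int × Int := ([1, 2, 3, 1], 2, 2)

def Spec_clone_nodes (nodes_list : List Int) (n_partitions : Int) (k : Int) (out : List (List Int)) : Prop := out = clone_nodes_alt nodes_list n_partitions k
instance (nodes_list : List Int) (n_partitions : Int) (k : Int) (out : List (List Int)) : Decidable (Spec_clone_nodes nodes_list n_partitions k out) := by unfold Spec_clone_nodes; infer_instance

-- ===== CLAIM (what is proved, stated in full; the proofs are below) =====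
def Claim_equal_clone_nodes : Prop := ∀ (nodes_list : List Int) (n_partitions : Int) (k : Int), Dom_clone_nodes nodes_list n_partitions k → Pre_clone_nodes nodes_list n_partitions k → Spec_clone_nodes nodes_list n_partitions k (clone_nodes nodes_list n_partitions k)

-- ===== LEMMAS AND PROOFS =====

-- A's state invariant: after T successful placements (with q = T / P, r = T % P) the
-- last r partitions have length q+1 and the others length q.
def pvInv (P q r : Nat) (ls : List (List Int)) : Prop :=
  ls.length = P ∧ r < P ∧
  ∀ i, i < P → (((ls[i]?).getD []).length) = q + (if P - r ≤ i then 1 else 0)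

theorem pvFoldlConstSucc {α : Type} (f : α → α) (m : Nat) (x : α) :
    (List.range (m+1)).foldl (fun a _ => f a) x = (List.range m).foldl (fun a _ => f a) (f x) := by
  rw [List.range_succ_eq_map, List.foldl_cons, List.foldl_map]

theorem pvFoldlConstFix {α : Type} (f : α → α) (m : Nat) (x : α) (h : f x = x) :
    (List.range m).foldl (fun a _ => f a) x = x := by
  induction m with
  | zero => rfl
  | succ m ih => rw [pvFoldlConstSucc, h, ih]

theorem pvFoldlId {α β : Type} (l : List β) (x : α) :
    l.foldl (fun a _ => a) x = x := by
  induction l generalizing x with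
  | nil => rfl
  | cons b l ih => rw [List.foldl_cons]; exact ih x

-- the fold inside find_min_num_partiton on an invariant-shaped list
theorem pvFindFold (P q r : Nat) (ls : List (List Int)) (h : pvInv P q r ls) :
    ∀ m, 1 ≤ m → m ≤ P →
      (List.range m).foldl
        (fun (st : Int × Nat) id =>
          let l : Int := (((ls[id]?).getD []).length : Int)
          if l ≤ st.1 then (l, id) else st)
        (((ls.headD []).length : Int), 0)
      = ((q : Int), min m (P - r) - 1) := by
  obtain ⟨hlen, hr, hsh⟩ := h
  intro m
  induction m with
  | zero => omega
  | succ m ih =>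
    intro _ hle
    have hshm : (((ls[m]?).getD []).length) = q + (if P - r ≤ m then 1 else 0) :=
      hsh m (by omega)
    by_cases hm : 1 ≤ m
    · rw [List.range_succ, List.foldl_append, ih hm (by omega)]
      simp only [List.foldl_cons, List.foldl_nil]
      by_cases hc : P - r ≤ m
      · rw [hshm, if_pos hc]
        rw [if_neg (by push_cast; omega)]
        congr 1
        omega
      · rw [hshm, if_neg hc]
        rw [if_pos (by push_cast; omega)]
        congr 1
        omega
    · have hm0 : m = 0 := by omega
      subst hm0
      have h0 : ls.headD [] = (ls[0]?).getD [] := by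
        cases ls with
        | nil => simp at hlen; omega
        | cons a t => rfl
      have hsh0 := hsh 0 (by omega)
      rw [if_neg (by omega)] at hsh0
      rw [List.range_succ, List.range_zero, List.nil_append]
      simp only [List.foldl_cons, List.foldl_nil, h0, hsh0]
      rw [if_pos le_rfl]
      congr 1
      omega

theorem pvFindMin (P q r : Nat) (ls : List (List Int)) (hP : 0 < P) (h : pvInv P q r ls) :
    find_min_num_partiton ls = P - 1 - r := by
  have hlen := h.1
  have hr := h.2.1
  simp only [find_min_num_partiton, hlen]
  rw [pvFindFold P q r ls h P (by omega) le_rfl]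
  simp only
  omega

theorem pvStepBlocked (P q r : Nat) (ls : List (List Int)) (node : Int)
    (hP : 0 < P) (h : pvInv P q r ls)
    (hmem : node ∈ (ls[P - 1 - r]?).getD []) : cloneStep ls node = ls := by
  simp only [cloneStep, pvFindMin P q r ls hP h]
  rw [if_pos hmem]

theorem pvStepPlaced (P q r : Nat) (ls : List (List Int)) (node : Int)
    (hP : 0 < P) (h : pvInv P q r ls)
    (hmem : node ∉ (ls[P - 1 - r]?).getD []) :
    cloneStep ls node = ls.set (P - 1 - r) (((ls[P - 1 - r]?).getD []) ++ [node]) := by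
  simp only [cloneStep, pvFindMin P q r ls hP h]
  rw [if_neg hmem]

theorem pvInvStep (P q r : Nat) (ls : List (List Int)) (node : Int)
    (hP : 0 < P) (h : pvInv P q r ls) :
    pvInv P (if r + 1 = P then q + 1 else q) (if r + 1 = P then 0 else r + 1)
      (ls.set (P - 1 - r) (((ls[P - 1 - r]?).getD []) ++ [node])) := by
  obtain ⟨hlen, hr, hsh⟩ := h
  refine ⟨by simp [hlen], by split <;> omega, ?_⟩
  intro i hi
  by_cases hij : P - 1 - r = i
  · subst hij
    rw [List.getElem?_set_self (by omega)]
    have := hsh (P - 1 - r) (by omega)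
    rw [if_neg (by omega)] at this
    simp only [Option.getD_some, List.length_append, List.length_cons, List.length_nil, this]
    split <;> split <;> omega
  · rw [List.getElem?_set_ne hij]
    have := hsh i hi
    rw [this]
    split <;> split <;> split <;> omega

theorem pvModStep (P : Nat) (t : Int) (r : Nat) (hr : r < P)
    (ht : t % (P : Int) = (r : Int)) :
    (t + 1) % (P : Int) = (((if r + 1 = P then 0 else r + 1) : Nat) : Int) := by
  have h2 := Int.emod_add_mul_ediv t (P : Int)
  have hdecomp : t + 1 = (r : Int) + 1 + (P : Int) * (t / (P : Int)) := by omega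
  rw [hdecomp, Int.add_mul_emod_self_left]
  by_cases hc : r + 1 = P
  · have : (r : Int) + 1 = (P : Int) := by exact_mod_cast hc
    rw [this, Int.emod_self, if_pos hc]
    rfl
  · rw [Int.emod_eq_of_lt (by positivity) (by exact_mod_cast (by omega : r + 1 < P))]
    rw [if_neg hc]
    push_cast
    ring

theorem pvInnerSim (P : Nat) (hP : 0 < P) (node : Int) :
    ∀ (fuel q r : Nat) (ls : List (List Int)) (t : Int),
      pvInv P q r ls → t % (P : Int) = (r : Int) →
      ∃ q' r' t', bLoop (P : Int) node fuel ls ls t =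
          ((List.range fuel).foldl (fun a _ => cloneStep a node) ls,
           (List.range fuel).foldl (fun a _ => cloneStep a node) ls, t')
        ∧ pvInv P q' r' ((List.range fuel).foldl (fun a _ => cloneStep a node) ls)
        ∧ t' % (P : Int) = (r' : Int) := by
  intro fuel
  induction fuel with
  | zero =>
    intro q r ls t h ht
    exact ⟨q, r, t, rfl, h, ht⟩
  | succ fuel ih =>
    intro q r ls t h ht
    have hr := h.2.1
    have hj : ((P : Int) - 1 - PySem.Int.mod t (P : Int)).toNat = P - 1 - r := by
      rw [PySem.Int.mod_eq_emod_of_pos (by exact_mod_cast hP), ht]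
      omega
    simp only [bLoop, hj]
    by_cases hmem : node ∈ (ls[P - 1 - r]?).getD []
    · rw [if_pos hmem]
      have hfix := pvStepBlocked P q r ls node hP h hmem
      rw [pvFoldlConstFix _ _ _ hfix]
      exact ⟨q, r, t, rfl, h, ht⟩
    · rw [if_neg hmem]
      rw [PySem.Set.add_of_not_mem hmem]
      obtain ⟨q', r', t', heq, hinv, ht'⟩ :=
        ih (if r + 1 = P then q + 1 else q) (if r + 1 = P then 0 else r + 1)
          (ls.set (P - 1 - r) (((ls[P - 1 - r]?).getD []) ++ [node])) (t + 1)
          (pvInvStep P q r ls node hP h) (pvModStep P t r hr ht)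
      refine ⟨q', r', t', ?_, ?_, ht'⟩
      · rw [heq, pvFoldlConstSucc, pvStepPlaced P q r ls node hP h hmem]
      · rw [pvFoldlConstSucc, pvStepPlaced P q r ls node hP h hmem]
        exact hinv

theorem pvOuterSim (P : Nat) (hP : 0 < P) (kf : Nat) (nodes : List Int) :
    ∀ (q r : Nat) (ls : List (List Int)) (t : Int),
      pvInv P q r ls → t % (P : Int) = (r : Int) →
      (nodes.foldl
        (fun (st : List (List Int) × List (PySem.Set Int) × Int) node =>
          bLoop (P : Int) node kf st.1 st.2.1 st.2.2)
        (ls, ls, t)).1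
      = nodes.foldl
          (fun a node => (List.range kf).foldl (fun a _ => cloneStep a node) a) ls := by
  induction nodes with
  | nil => intro q r ls t _ _; rfl
  | cons node nodes ih =>
    intro q r ls t h ht
    rw [List.foldl_cons, List.foldl_cons]
    obtain ⟨q', r', t', heq, hinv, ht'⟩ := pvInnerSim P hP node kf q r ls t h ht
    rw [heq]
    exact ih q' r' _ t' hinv ht'

-- ===== VERDICT (by name: the statement is the Claim_ definition above) =====
theorem clone_nodes_spec : Claim_equal_clone_nodes := by
  intro nodes_list n_partitions k _ hpre
  unfold Spec_clone_nodes clone_nodes clone_nodes_alt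
  by_cases hpos : 0 < n_partitions
  · have hcast : ((n_partitions.toNat : Nat) : Int) = n_partitions :=
      Int.toNat_of_nonneg hpos.le
    have hP : 0 < n_partitions.toNat := by omega
    have hinv : pvInv n_partitions.toNat 0 0 (List.replicate n_partitions.toNat []) := by
      refine ⟨by simp, hP, ?_⟩
      intro i hi
      rw [List.getElem?_replicate, if_pos hi]
      simp only [Option.getD_some, List.length_nil]
      rw [if_neg (by omega)]
    have := pvOuterSim n_partitions.toNat hP k.toNat nodes_list 0 0
      (List.replicate n_partitions.toNat []) 0 hinv (by simp)
    rw [hcast] at this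
    exact this.symm
  · rcases hpre with h | h | h
    · omega
    · subst h; rfl
    · have hk : k.toNat = 0 := by omega
      rw [hk]
      simp only [List.range_zero, List.foldl_nil]
      rw [pvFoldlId]
      have hb : (fun (st : List (List Int) × List (PySem.Set Int) × Int) (node : Int) =>
          bLoop n_partitions node 0 st.1 st.2.1 st.2.2) = fun st _ => st := rfl
      rw [hb, pvFoldlId]
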